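-- pv_equiv track=rewrite | github.com/dirtysalt/codes | misc/leetcode/change-minimum-characters-to-satisfy-one-of-three-conditions.py | minCharacters
-- ===== SOURCE A (Python) =====
-- def minCharacters(a: str, b: str) -> int:
--     A = [0] * 26
--     B = [0] * 26
--     for c in a:
--         A[ord(c) - ord('a')] += 1
--     for c in b:
--         B[ord(c) - ord('a')] += 1
--
--     ans = 1 << 25
--     for i in range(26):
--         op = len(a) + len(b) - A[i] - B[i]
--         ans = min(ans, op)
--
--     for i in range(1, 26):
--         A[i] += A[i - 1]
--         B[i] += B[i - 1]
--
--     for s1 in range(26):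
--         for s2 in range(s1 + 1, 26):
--             ca = len(a) - A[s1]
--             cb = B[s2 - 1]
--             op = ca + cb
--
--             ca = A[s2 - 1]
--             cb = len(b) - B[s1]
--             op2 = ca + cb
--
--             ans = min(ans, op, op2)
--     return ans
-- ===== SOURCE B (Python) =====
-- def minCharacters(a: str, b: str) -> int:
--     ca = [0] * 26
--     cb = [0] * 26
--     for c in a:
--         ca[ord(c) - 97] += 1
--     for c in b:
--         cb[ord(c) - 97] += 1
--     n, m = len(a), len(b)
--     ans = 1 << 25
--     # condition 3: change everything except the most frequent common letter
--     ans = min(ans, n + m - max(ca[i] + cb[i] for i in range(26)))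
--     # conditions 1 & 2: one pass over the 25 split thresholds with running prefix sums
--     sa = sb = 0
--     for t in range(25):
--         sa += ca[t]
--         sb += cb[t]
--         ans = min(ans, n - sa + sb, sa + m - sb)
--     return ans
-- ===== Notes on version B (the rewrite author's own statement) =====
-- stated objective: simpler
-- what changed: Replaces A's stored prefix-sum arrays and nested 26x26 split loop by a single pass over the 25 split thresholds with two running prefix sums (the inner minimum is always at s2=s1+1 since prefix counts are monotone), and computes condition 3 as n+m-max(count sums) instead of a 26-step min-fold.
import Mathlib
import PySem

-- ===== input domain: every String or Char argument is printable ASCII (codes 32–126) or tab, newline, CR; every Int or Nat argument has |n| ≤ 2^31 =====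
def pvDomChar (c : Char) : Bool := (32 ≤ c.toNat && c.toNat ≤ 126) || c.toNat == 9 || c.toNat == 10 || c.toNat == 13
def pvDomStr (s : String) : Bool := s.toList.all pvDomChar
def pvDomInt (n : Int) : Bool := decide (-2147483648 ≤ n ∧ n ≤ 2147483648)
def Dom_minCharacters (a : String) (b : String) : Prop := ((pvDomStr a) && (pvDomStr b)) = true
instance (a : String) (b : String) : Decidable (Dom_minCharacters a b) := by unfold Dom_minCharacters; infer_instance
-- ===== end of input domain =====

-- B replaces A's stored prefix arrays and nested 26x26 split loop by a single pass over the
-- 25 split thresholds with running prefix sums (objective: simpler).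


-- ===== PORT A =====

-- shared counting phase: both Pythons open with the identical two counting loops
def pvCount (s : List Char) : List Int :=
  s.foldl (fun cnt c =>
      PySem.List.pySetD cnt ((c.toNat : Int) - 97)
        (PySem.List.pyGetD cnt ((c.toNat : Int) - 97) 0 + 1))
    (List.replicate 26 0)

-- everything A does after the two counting loops (A, B the count arrays; la = len(a), lb = len(b))
def pvABody (A0 B0 : List Int) (la lb : Int) : Int :=
  let ans : Int := 1 <<< 25
  let ans := (PySem.List.pyRange 0 26 1).foldl
      (fun ans i => min ans (la + lb - PySem.List.pyGetD A0 i 0 - PySem.List.pyGetD B0 i 0)) ans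
  let P := (PySem.List.pyRange 1 26 1).foldl
      (fun (p : List Int × List Int) i =>
        (PySem.List.pySetD p.1 i (PySem.List.pyGetD p.1 i 0 + PySem.List.pyGetD p.1 (i - 1) 0),
         PySem.List.pySetD p.2 i (PySem.List.pyGetD p.2 i 0 + PySem.List.pyGetD p.2 (i - 1) 0)))
      (A0, B0)
  (PySem.List.pyRange 0 26 1).foldl
    (fun ans s1 => (PySem.List.pyRange (s1 + 1) 26 1).foldl
      (fun ans s2 =>
        let ca := la - PySem.List.pyGetD P.1 s1 0
        let cb := PySem.List.pyGetD P.2 (s2 - 1) 0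
        let op := ca + cb
        let ca2 := PySem.List.pyGetD P.1 (s2 - 1) 0
        let cb2 := lb - PySem.List.pyGetD P.2 s1 0
        let op2 := ca2 + cb2
        min (min ans op) op2) ans) ans

def minCharacters (a : String) (b : String) : Int :=
  pvABody (pvCount a.toList) (pvCount b.toList) (PySem.Str.len a) (PySem.Str.len b)

-- ===== PORT B =====

-- everything B does after the two counting loops
def pvBBody (cA cB : List Int) (n m : Int) : Int :=
  let ans : Int := 1 <<< 25
  let ans : Int := min ans (n + m -
    (((PySem.List.pyRange 0 26 1).map
        (fun i => PySem.List.pyGetD cA i 0 + PySem.List.pyGetD cB i 0)).max?).getD 0)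
  let r := (PySem.List.pyRange 0 25 1).foldl
      (fun (s : Int × Int × Int) t =>
        let sa := s.1 + PySem.List.pyGetD cA t 0
        let sb := s.2.1 + PySem.List.pyGetD cB t 0
        (sa, sb, min (min s.2.2 (n - sa + sb)) (sa + m - sb)))
      (0, 0, ans)
  r.2.2

def minCharacters_alt (a : String) (b : String) : Int :=
  pvBBody (pvCount a.toList) (pvCount b.toList) (PySem.Str.len a) (PySem.Str.len b)

-- ===== PRECONDITION & SPEC =====
-- Pre_ excludes exactly the strings containing a character of code < 71 or > 122, on which
-- Python A raises IndexError in its counting loop (codes 71..96 wrap via negative indexing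
-- and do not raise, so they are kept inside).
def Pre_minCharacters (a : String) (b : String) : Prop :=
  (a.toList.all (fun c => decide (71 ≤ c.toNat) && decide (c.toNat ≤ 122))) = true ∧
  (b.toList.all (fun c => decide (71 ≤ c.toNat) && decide (c.toNat ≤ 122))) = true
instance (a : String) (b : String) : Decidable (Pre_minCharacters a b) := by
  unfold Pre_minCharacters; infer_instance

def pvWitness_minCharacters : String × String := ("ab", "cz")

def Spec_minCharacters (a : String) (b : String) (out : Int) : Prop := out = minCharacters_alt a b
instance (a : String) (b : String) (out : Int) : Decidable (Spec_minCharacters a b out) := by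
  unfold Spec_minCharacters; infer_instance

-- ===== CLAIM (what is proved, stated in full; the proofs are below) =====
def Claim_equal_minCharacters : Prop := ∀ (a : String) (b : String), Dom_minCharacters a b → Pre_minCharacters a b → Spec_minCharacters a b (minCharacters a b)

-- ===== LEMMAS AND PROOFS =====


-- prefix sums: sum of the first k+1 entries
def pvPsum (l : List Int) (k : Nat) : Int := (l.take (k + 1)).sum

-- a fold of mins never goes below an accumulator already below every candidate
theorem pv_absorb (f g : Int → Int) : ∀ (l : List Int) (x : Int),
    (∀ j ∈ l, x ≤ f j ∧ x ≤ g j) →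
    l.foldl (fun a j => min (min a (f j)) (g j)) x = x := by
  intro l
  induction l with
  | nil => intro x _; rfl
  | cons i l ih =>
    intro x h
    have hi := h i (by simp)
    have he : min (min x (f i)) (g i) = x := by omega
    simp only [List.foldl_cons, he]
    exact ih x (fun j hj => h j (by simp [hj]))

-- fold of min (c - h i) is c minus the fold of max (h i)
theorem pv_maxfold (h : Int → Int) (c : Int) : ∀ (l : List Int) (x v : Int),
    l.foldl (fun a i => min a (c - h i)) (min x (c - v))
      = min x (c - l.foldl (fun w i => max w (h i)) v) := by
  intro l
  induction l with
  | nil => intro x v; rfl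
  | cons i l ih =>
    intro x v
    have he : min (min x (c - v)) (c - h i) = min x (c - max v (h i)) := by omega
    simp only [List.foldl_cons]
    rw [he, ih x (max v (h i))]

theorem pv_psum_mono (l : List Int) (h : ∀ x ∈ l, 0 ≤ x) {k k' : Nat} (hk : k ≤ k') :
    pvPsum l k ≤ pvPsum l k' := by
  unfold pvPsum
  have h1 : l.take (k + 1) = (l.take (k' + 1)).take (k + 1) := by
    rw [List.take_take]; congr 1; omega
  calc (l.take (k + 1)).sum = ((l.take (k' + 1)).take (k + 1)).sum := by rw [← h1]
    _ ≤ ((l.take (k' + 1)).take (k + 1)).sum + ((l.take (k' + 1)).drop (k + 1)).sum := by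
        have : 0 ≤ ((l.take (k' + 1)).drop (k + 1)).sum :=
          List.sum_nonneg (fun x hx => h x (List.mem_of_mem_take (List.mem_of_mem_drop hx)))
        omega
    _ = (l.take (k' + 1)).sum := by
        rw [← List.sum_append, List.take_append_drop]


-- one leg of A's in-place prefix loop
def pvPfx (p : List Int) (i : Int) : List Int :=
  PySem.List.pySetD p i (PySem.List.pyGetD p i 0 + PySem.List.pyGetD p (i - 1) 0)

-- A's prefix loop turns the count array into its prefix sums
theorem pv_prefix (l : List Int) (hl : l.length = 26) :
    ∀ (j : Nat), j ≤ 26 →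
      ((PySem.List.pyRange 1 (j : Int)).foldl pvPfx l).length = 26 ∧
      (∀ k : Nat, k < 26 →
        PySem.List.pyGetD ((PySem.List.pyRange 1 (j : Int)).foldl pvPfx l) (k : Int) 0
          = if k < j then pvPsum l k else PySem.List.pyGetD l (k : Int) 0) := by
  intro j
  induction j with
  | zero =>
    intro _
    constructor
    · simpa using hl
    · intro k _
      simp [PySem.List.pyRange_one_eq_nil (by norm_num : (0:Int) ≤ 1)]
  | succ j ih =>
    intro hj
    rcases Nat.eq_zero_or_pos j with hj0 | hj1
    · subst hj0
      constructor
      · rw [show ((0 + 1 : Nat) : Int) = 1 by norm_num,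
          PySem.List.pyRange_one_eq_nil (le_refl (1 : Int)), List.foldl_nil]
        exact hl
      · intro k hk
        rw [show ((0 + 1 : Nat) : Int) = 1 by norm_num,
          PySem.List.pyRange_one_eq_nil (le_refl (1 : Int)), List.foldl_nil]
        by_cases hk0 : k < 1
        · have : k = 0 := by omega
          subst this
          obtain ⟨x, t, rfl⟩ : ∃ x t, l = x :: t := by
            cases l with | nil => simp at hl | cons x t => exact ⟨x, t, rfl⟩
          simp [pvPsum]
        · simp [hk0]
    · obtain ⟨hlen, hget⟩ := ih (by omega)
      have hcast : ((j + 1 : Nat) : Int) = (j : Int) + 1 := by push_cast; ring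
      have hsplit : PySem.List.pyRange 1 ((j + 1 : Nat) : Int)
          = PySem.List.pyRange 1 (j : Int) ++ [(j : Int)] := by
        rw [hcast, PySem.List.pyRange_one_succ_right (by exact_mod_cast hj1)]
      set L := (PySem.List.pyRange 1 (j : Int)).foldl pvPfx l with hL
      have hstep : (PySem.List.pyRange 1 ((j + 1 : Nat) : Int)).foldl pvPfx l
          = pvPfx L (j : Int) := by
        rw [hsplit, List.foldl_append]; rfl
      -- the two reads in the step
      have hjlt : j < 26 := by omega
      have hread1 : PySem.List.pyGetD L (j : Int) 0 = PySem.List.pyGetD l (j : Int) 0 := by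
        have := hget j hjlt
        simpa [Nat.lt_irrefl] using this
      have hcast2 : (j : Int) - 1 = ((j - 1 : Nat) : Int) := by
        have : 1 ≤ j := hj1
        push_cast [this]; ring
      have hread2 : PySem.List.pyGetD L ((j : Int) - 1) 0 = pvPsum l (j - 1) := by
        rw [hcast2]
        have := hget (j - 1) (by omega)
        simpa [Nat.sub_lt hj1 Nat.one_pos] using this
      have hval : PySem.List.pyGetD l (j : Int) 0 + PySem.List.pyGetD L ((j : Int) - 1) 0
          = pvPsum l j := by
        rw [hread2]
        have hgj : PySem.List.pyGetD l (j : Int) 0 = l[j]'(by omega) := by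
          rw [PySem.List.pyGetD_natCast, List.getD_eq_getElem l 0 (by omega)]
        have hsucc : pvPsum l j = pvPsum l (j - 1) + l[j]'(by omega) := by
          unfold pvPsum
          have h1 : j - 1 + 1 = j := by omega
          rw [h1, List.sum_take_succ l j (by omega)]
        rw [hgj]; omega
      constructor
      · rw [hstep]
        unfold pvPfx
        rw [PySem.List.length_pySetD]
        exact hlen
      · intro k hk
        rw [hstep]
        unfold pvPfx
        rw [hread1, hval]
        rw [PySem.List.pyGetD_pySetD_natCast L j k (pvPsum l j) 0 (by omega)]
        by_cases hkj : k = j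
        · subst hkj; simp
        · rw [if_neg hkj, hget k hk]
          by_cases hlt : k < j
          · rw [if_pos hlt, if_pos (by omega)]
          · rw [if_neg hlt, if_neg (by omega)]


-- B's stateful threshold loop, characterised with explicit prefix sums
theorem pv_bfold (cA cB : List Int) (hlA : cA.length = 26) (hlB : cB.length = 26)
    (n m b0 : Int) :
    ∀ (K : Nat), K ≤ 25 →
      (PySem.List.pyRange 0 (K : Int)).foldl
        (fun (s : Int × Int × Int) t =>
          (s.1 + PySem.List.pyGetD cA t 0, s.2.1 + PySem.List.pyGetD cB t 0,
            min (min s.2.2 (n - (s.1 + PySem.List.pyGetD cA t 0) + (s.2.1 + PySem.List.pyGetD cB t 0)))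
              (s.1 + PySem.List.pyGetD cA t 0 + m - (s.2.1 + PySem.List.pyGetD cB t 0))))
        (0, 0, b0)
      = ((cA.take K).sum, (cB.take K).sum,
         (PySem.List.pyRange 0 (K : Int)).foldl
           (fun best t => min (min best (n - pvPsum cA t.toNat + pvPsum cB t.toNat))
             (pvPsum cA t.toNat + m - pvPsum cB t.toNat)) b0) := by
  intro K
  induction K with
  | zero =>
    intro _
    rw [show ((0 : Nat) : Int) = 0 by norm_num,
      PySem.List.pyRange_one_eq_nil (le_refl (0 : Int))]
    simp
  | succ K ih =>
    intro hK
    have hcast : ((K + 1 : Nat) : Int) = (K : Int) + 1 := by push_cast; ring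
    have hsplit : PySem.List.pyRange 0 ((K + 1 : Nat) : Int)
        = PySem.List.pyRange 0 (K : Int) ++ [(K : Int)] := by
      rw [hcast, PySem.List.pyRange_one_succ_right (by positivity)]
    rw [hsplit, List.foldl_append, List.foldl_append, ih (by omega)]
    have hgA : PySem.List.pyGetD cA ((K : Int)) 0 = cA[K]'(by omega) := by
      rw [PySem.List.pyGetD_natCast, List.getD_eq_getElem cA 0 (by omega)]
    have hgB : PySem.List.pyGetD cB ((K : Int)) 0 = cB[K]'(by omega) := by
      rw [PySem.List.pyGetD_natCast, List.getD_eq_getElem cB 0 (by omega)]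
    have hsA : (cA.take K).sum + PySem.List.pyGetD cA ((K : Int)) 0 = pvPsum cA K := by
      rw [hgA]; unfold pvPsum; rw [List.sum_take_succ cA K (by omega)]
    have hsB : (cB.take K).sum + PySem.List.pyGetD cB ((K : Int)) 0 = pvPsum cB K := by
      rw [hgB]; unfold pvPsum; rw [List.sum_take_succ cB K (by omega)]
    simp only [List.foldl_cons, List.foldl_nil]
    rw [hsA, hsB]
    have ht : ((K : Int)).toNat = K := by omega
    rw [ht]
    unfold pvPsum
    rfl

theorem pv_main (cA cB : List Int) (hlA : cA.length = 26) (hlB : cB.length = 26)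
    (hA : ∀ x ∈ cA, 0 ≤ x) (hB : ∀ x ∈ cB, 0 ≤ x) (n m : Int) :
    pvABody cA cB n m = pvBBody cA cB n m := by
  unfold pvABody pvBBody
  dsimp only
  rw [PySem.List.foldl_prod_mk
    (fun (x : List Int) (i : Int) =>
      PySem.List.pySetD x i (PySem.List.pyGetD x i 0 + PySem.List.pyGetD x (i - 1) 0))
    (fun (x : List Int) (i : Int) =>
      PySem.List.pySetD x i (PySem.List.pyGetD x i 0 + PySem.List.pyGetD x (i - 1) 0))
    (PySem.List.pyRange 1 26) cA cB]
  dsimp only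
  rw [show (fun (x : List Int) (i : Int) =>
      PySem.List.pySetD x i (PySem.List.pyGetD x i 0 + PySem.List.pyGetD x (i - 1) 0)) = pvPfx
    from rfl]
  set PA := (PySem.List.pyRange 1 26).foldl pvPfx cA with hPAdef
  set PB := (PySem.List.pyRange 1 26).foldl pvPfx cB with hPBdef
  have h26c : ((26 : Nat) : Int) = 26 := by norm_num
  have hpfxA := pv_prefix cA hlA 26 (le_refl 26)
  have hpfxB := pv_prefix cB hlB 26 (le_refl 26)
  rw [h26c] at hpfxA hpfxB
  have hgetA : ∀ i : Int, 0 ≤ i → i < 26 → PySem.List.pyGetD PA i 0 = pvPsum cA i.toNat := by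
    intro i h0 h1
    have hk := hpfxA.2 i.toNat (by omega)
    rw [if_pos (by omega)] at hk
    rw [show ((i.toNat : Nat) : Int) = i by omega] at hk
    exact hk
  have hgetB : ∀ i : Int, 0 ≤ i → i < 26 → PySem.List.pyGetD PB i 0 = pvPsum cB i.toNat := by
    intro i h0 h1
    have hk := hpfxB.2 i.toNat (by omega)
    rw [if_pos (by omega)] at hk
    rw [show ((i.toNat : Nat) : Int) = i by omega] at hk
    exact hk
  -- condition-3 phase
  set M := (PySem.List.pyRange 1 26).foldl
      (fun w i => max w (PySem.List.pyGetD cA i 0 + PySem.List.pyGetD cB i 0))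
      (PySem.List.pyGetD cA 0 0 + PySem.List.pyGetD cB 0 0) with hMdef
  have hcongr3 : (PySem.List.pyRange 0 26).foldl
      (fun ans i => min ans (n + m - PySem.List.pyGetD cA i 0 - PySem.List.pyGetD cB i 0))
      ((1 <<< 25 : Nat) : Int)
      = (PySem.List.pyRange 0 26).foldl
          (fun a i => min a (n + m - (PySem.List.pyGetD cA i 0 + PySem.List.pyGetD cB i 0)))
          ((1 <<< 25 : Nat) : Int) := by
    apply PySem.List.foldl_congr_mem
    intro acc x _
    omega
  have hcond3 : (PySem.List.pyRange 0 26).foldl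
      (fun a i => min a (n + m - (PySem.List.pyGetD cA i 0 + PySem.List.pyGetD cB i 0)))
      ((1 <<< 25 : Nat) : Int) = min ((1 <<< 25 : Nat) : Int) (n + m - M) := by
    rw [PySem.List.pyRange_one_cons (by norm_num : (0 : Int) < 26),
      show (0 : Int) + 1 = 1 by norm_num]
    simp only [List.foldl_cons]
    exact pv_maxfold (fun i => PySem.List.pyGetD cA i 0 + PySem.List.pyGetD cB i 0) (n + m)
      (PySem.List.pyRange 1 26) ((1 <<< 25 : Nat) : Int)
      (PySem.List.pyGetD cA 0 0 + PySem.List.pyGetD cB 0 0)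
  have hbest : (((PySem.List.pyRange 0 26).map
      (fun i => PySem.List.pyGetD cA i 0 + PySem.List.pyGetD cB i 0)).max?).getD 0 = M := by
    rw [PySem.List.pyRange_one_cons (by norm_num : (0 : Int) < 26),
      show (0 : Int) + 1 = 1 by norm_num, List.map_cons, List.max?_cons', Option.getD_some,
      List.foldl_map]
  rw [hcongr3, hcond3, hbest]
  -- B's threshold loop, with prefix sums made explicit
  have hb := pv_bfold cA cB hlA hlB n m (min ((1 <<< 25 : Nat) : Int) (n + m - M)) 25 (le_refl 25)
  rw [show ((25 : Nat) : Int) = 25 by norm_num] at hb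
  rw [hb]
  dsimp only
  -- collapse A's nested split loop
  rw [show (26 : Int) = 25 + 1 by norm_num,
    PySem.List.pyRange_one_succ_right (by norm_num : (0 : Int) ≤ 25), List.foldl_append]
  simp only [List.foldl_cons, List.foldl_nil]
  rw [PySem.List.pyRange_one_eq_nil (le_refl ((25 : Int) + 1)), List.foldl_nil]
  rw [PySem.List.foldl_congr_mem (PySem.List.pyRange 0 25) _
    (fun best t => min (min best (n - pvPsum cA t.toNat + pvPsum cB t.toNat))
      (pvPsum cA t.toNat + m - pvPsum cB t.toNat)) _ ?hcollapse]
  case hcollapse =>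
    intro acc s1 hs1
    obtain ⟨hs0, hs25⟩ := PySem.List.mem_pyRange_one.mp hs1
    rw [PySem.List.pyRange_one_cons (by omega : s1 + 1 < 25 + 1)]
    simp only [List.foldl_cons]
    rw [show s1 + 1 - 1 = s1 by ring]
    rw [pv_absorb
      (fun s2 => n - PySem.List.pyGetD PA s1 0 + PySem.List.pyGetD PB (s2 - 1) 0)
      (fun s2 => PySem.List.pyGetD PA (s2 - 1) 0 + (m - PySem.List.pyGetD PB s1 0))
      (PySem.List.pyRange (s1 + 1 + 1) (25 + 1)) _ ?habs]
    case habs =>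
      intro j hj
      obtain ⟨hj1, hj2⟩ := PySem.List.mem_pyRange_one.mp hj
      have hmB : PySem.List.pyGetD PB s1 0 ≤ PySem.List.pyGetD PB (j - 1) 0 := by
        rw [hgetB s1 hs0 (by omega), hgetB (j - 1) (by omega) (by omega)]
        exact pv_psum_mono cB hB (by omega)
      have hmA : PySem.List.pyGetD PA s1 0 ≤ PySem.List.pyGetD PA (j - 1) 0 := by
        rw [hgetA s1 hs0 (by omega), hgetA (j - 1) (by omega) (by omega)]
        exact pv_psum_mono cA hA (by omega)
      constructor <;> · dsimp only; omega
    rw [hgetA s1 hs0 (by omega), hgetB s1 hs0 (by omega)]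
    omega

-- writing a cell keeps every entry either old or the written value
theorem pv_mem_pySetD {x : Int} (l : List Int) (i : Int) (v : Int)
    (hx : x ∈ PySem.List.pySetD l i v) : x ∈ l ∨ x = v := by
  unfold PySem.List.pySetD PySem.List.pySet? PySem.List.pyIdx? at hx
  split_ifs at hx <;> simp only [Option.map_some, Option.map_none, Option.getD_some,
    Option.getD_none] at hx
  · exact List.mem_or_eq_of_mem_set hx
  · exact Or.inl hx
  · exact List.mem_or_eq_of_mem_set hx
  · exact Or.inl hx

theorem pv_pyGetD_nonneg (l : List Int) (h : ∀ x ∈ l, 0 ≤ x) (i : Int) :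
    0 ≤ PySem.List.pyGetD l i 0 := by
  unfold PySem.List.pyGetD
  cases hg : PySem.List.pyGet? l i with
  | none => simp
  | some x => simpa using h x (PySem.List.mem_of_pyGet?_eq_some _ hg)

theorem pv_count_len_aux (s : List Char) : ∀ (init : List Int),
    (s.foldl (fun cnt c => PySem.List.pySetD cnt ((c.toNat : Int) - 97)
      (PySem.List.pyGetD cnt ((c.toNat : Int) - 97) 0 + 1)) init).length = init.length := by
  induction s with
  | nil => intro init; rfl
  | cons c s ih => intro init; rw [List.foldl_cons, ih, PySem.List.length_pySetD]

theorem pv_count_nonneg_aux (s : List Char) : ∀ (init : List Int), (∀ x ∈ init, 0 ≤ x) →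
    ∀ x ∈ s.foldl (fun cnt c => PySem.List.pySetD cnt ((c.toNat : Int) - 97)
      (PySem.List.pyGetD cnt ((c.toNat : Int) - 97) 0 + 1)) init, 0 ≤ x := by
  induction s with
  | nil => intro init h; exact h
  | cons c s ih =>
    intro init h
    rw [List.foldl_cons]
    apply ih
    intro x hx
    rcases pv_mem_pySetD _ _ _ hx with h1 | h1
    · exact h x h1
    · have := pv_pyGetD_nonneg init h ((c.toNat : Int) - 97)
      omega

theorem pv_count_length (s : List Char) : (pvCount s).length = 26 := by
  unfold pvCount
  rw [pv_count_len_aux, List.length_replicate]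

theorem pv_count_nonneg (s : List Char) : ∀ x ∈ pvCount s, 0 ≤ x := by
  unfold pvCount
  exact pv_count_nonneg_aux s (List.replicate 26 0) (by intro x hx; simp at hx; omega)

-- ===== VERDICT (by name: the statement is the Claim_ definition above) =====
theorem minCharacters_spec : Claim_equal_minCharacters := by
  intro a b _hDom _hPre
  unfold Spec_minCharacters minCharacters minCharacters_alt
  exact pv_main _ _ (pv_count_length a.toList) (pv_count_length b.toList)
    (pv_count_nonneg a.toList) (pv_count_nonneg b.toList)
    (PySem.Str.len a) (PySem.Str.len b)
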